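-- pv_equiv track=rewrite | github.com/Ahram-Ahn/mtRNAFeat | src/mtrnafeat/core/structure.py | filter_max_bp_span
-- ===== SOURCE A (Python) =====
-- def pair_table(structure: str) -> dict[int, int]:
--     """Return a dict mapping every paired index → its partner. 0-based."""
--     stack: list[int] = []
--     pairs: dict[int, int] = {}
--     for i, ch in enumerate(structure):
--         if ch == "(":
--             stack.append(i)
--         elif ch == ")":
--             if not stack:
--                 raise ValueError("Unbalanced ')' in structure")
--             j = stack.pop()
--             pairs[i] = j
--             pairs[j] = i
--     if stack:
--         raise ValueError(f"{len(stack)} unclosed '(' in structure")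
--     return pairs
--
-- def extract_pairs(structure: str) -> list[tuple[int, int]]:
--     """Return [(i, j) ...] with i<j, sorted by i. 0-based."""
--     pt = pair_table(structure)
--     return sorted({(min(i, j), max(i, j)) for i, j in pt.items()}, key=lambda p: p[0])
--
-- def filter_max_bp_span(structure: str, max_bp_span: int | None) -> tuple[str, int]:
--     """Replace pairs with span > max_bp_span by '.'. Returns (new_struct, n_removed)."""
--     if max_bp_span is None:
--         return structure, 0
--     chars = list(structure)
--     removed = 0
--     for i, j in extract_pairs(structure):
--         if (j - i) > int(max_bp_span):
--             chars[i] = "."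
--             chars[j] = "."
--             removed += 1
--     return "".join(chars), removed
-- ===== SOURCE B (Python) =====
-- def filter_max_bp_span(structure: str, max_bp_span: int | None) -> tuple[str, int]:
--     """Replace pairs with span > max_bp_span by '.'. Returns (new_struct, n_removed)."""
--     if max_bp_span is None:
--         return structure, 0
--     m = int(max_bp_span)
--     chars = list(structure)
--     stack: list[int] = []
--     removed = 0
--     for i, ch in enumerate(structure):
--         if ch == "(":
--             stack.append(i)
--         elif ch == ")":
--             if not stack:
--                 raise ValueError("Unbalanced ')' in structure")
--             j = stack.pop()
--             if i - j > m:
--                 chars[j] = "."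
--                 chars[i] = "."
--                 removed += 1
--     if stack:
--         raise ValueError(f"{len(stack)} unclosed '(' in structure")
--     return "".join(chars), removed
-- ===== Notes on version B (the rewrite author's own statement) =====
-- stated objective: simpler
-- what changed: Single stack pass that checks the span the moment a pair closes and dots it immediately, instead of building a pair dict, deduplicating into a set and sorting the pairs before a second filtering pass.
import Mathlib
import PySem

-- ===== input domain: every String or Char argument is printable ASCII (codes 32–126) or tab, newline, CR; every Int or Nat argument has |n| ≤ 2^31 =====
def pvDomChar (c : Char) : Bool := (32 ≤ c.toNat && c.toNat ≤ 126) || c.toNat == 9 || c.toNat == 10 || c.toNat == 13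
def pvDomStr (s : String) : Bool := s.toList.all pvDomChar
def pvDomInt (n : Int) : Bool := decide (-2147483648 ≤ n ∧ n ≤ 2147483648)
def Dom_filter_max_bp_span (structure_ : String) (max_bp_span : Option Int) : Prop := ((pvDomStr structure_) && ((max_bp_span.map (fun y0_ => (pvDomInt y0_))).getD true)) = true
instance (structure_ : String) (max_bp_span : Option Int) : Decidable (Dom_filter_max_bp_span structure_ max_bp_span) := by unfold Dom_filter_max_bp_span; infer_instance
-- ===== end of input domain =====

-- B replaces A's pair-dict + set + sort + second pass by a single stack pass that dots a pair
-- the moment it closes (objective: simpler — one pass, no dict/set/sort). Equivalence is about the return value.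

-- ===== PORT A =====
-- pair_table: scan with a stack, building the index→partner dict; none = ValueError
def pvPairTableGo : List (Int × Char) → List Int → PySem.Dict Int Int → Option (PySem.Dict Int Int)
  | [], stack, pairs => if stack = [] then some pairs else none
  | (i, ch) :: rest, stack, pairs =>
    if ch = '(' then pvPairTableGo rest (i :: stack) pairs
    else if ch = ')' then
      match stack with
      | [] => none
      | j :: stack' => pvPairTableGo rest stack' ((pairs.insert i j).insert j i)
    else pvPairTableGo rest stack pairs

def pvPairTable (s : String) : Option (PySem.Dict Int Int) :=
  pvPairTableGo (PySem.List.enumerate s.toList) [] PySem.Dict.empty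

-- extract_pairs: sorted({(min(i,j), max(i,j)) ...}, key=p[0]) — key is injective on the set
def pvExtractPairs (s : String) : Option (List (Int × Int)) :=
  (pvPairTable s).map (fun pt =>
    PySem.List.sorted
      (PySem.Set.ofList (pt.items.map (fun p => (min p.1 p.2, max p.1 p.2))))
      (fun p => p.1) false)

def filter_max_bp_span (structure_ : String) (max_bp_span : Option Int) : String × Int :=
  match max_bp_span with
  | none => (structure_, 0)
  | some m =>
    match pvExtractPairs structure_ with
    | none => (structure_, 0)      -- Python raises ValueError here; excluded by Pre_
    | some ps =>
      let r := ps.foldl (fun acc p =>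
        if p.2 - p.1 > m then
          ((PySem.List.pySetD (PySem.List.pySetD acc.1 p.1 '.') p.2 '.'), acc.2 + 1)
        else acc) (structure_.toList, (0 : Int))
      (String.ofList r.1, r.2)

-- ===== PORT B =====
-- single stack pass: on ')' pop the matching '(' and dot the pair at once if its span exceeds m
def pvScanB (m : Int) : List (Int × Char) → List Int → List Char → Int → Option (List Char × Int)
  | [], stack, chars, removed => if stack = [] then some (chars, removed) else none
  | (i, ch) :: rest, stack, chars, removed =>
    if ch = '(' then pvScanB m rest (i :: stack) chars removed
    else if ch = ')' then
      match stack with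
      | [] => none
      | j :: stack' =>
        if i - j > m then
          pvScanB m rest stack' (PySem.List.pySetD (PySem.List.pySetD chars j '.') i '.') (removed + 1)
        else pvScanB m rest stack' chars removed
    else pvScanB m rest stack chars removed

def filter_max_bp_span_alt (structure_ : String) (max_bp_span : Option Int) : String × Int :=
  match max_bp_span with
  | none => (structure_, 0)
  | some m =>
    match pvScanB m (PySem.List.enumerate structure_.toList) [] structure_.toList 0 with
    | none => (structure_, 0)      -- Python raises ValueError here; excluded by Pre_
    | some (chars, removed) => (String.ofList chars, removed)

-- ===== PRECONDITION & SPEC =====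
-- Pre_ excludes exactly the inputs on which A raises ValueError: an unbalanced dot-bracket
-- structure together with a non-None max_bp_span (balanced = every prefix has at least as many
-- '(' as ')' and the totals agree).
def Pre_filter_max_bp_span (structure_ : String) (max_bp_span : Option Int) : Prop :=
  max_bp_span = none ∨
    ((∀ k ∈ List.range (structure_.toList.length + 1),
        (structure_.toList.take k).count ')' ≤ (structure_.toList.take k).count '(') ∧
      structure_.toList.count '(' = structure_.toList.count ')')
instance (structure_ : String) (max_bp_span : Option Int) : Decidable (Pre_filter_max_bp_span structure_ max_bp_span) := by unfold Pre_filter_max_bp_span; infer_instance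

def pvWitness_filter_max_bp_span : String × Option Int := ("((..).)", some 2)

def Spec_filter_max_bp_span (structure_ : String) (max_bp_span : Option Int) (out : String × Int) : Prop := out = filter_max_bp_span_alt structure_ max_bp_span
instance (structure_ : String) (max_bp_span : Option Int) (out : String × Int) : Decidable (Spec_filter_max_bp_span structure_ max_bp_span out) := by unfold Spec_filter_max_bp_span; infer_instance

-- ===== CLAIM (what is proved, stated in full; the proofs are below) =====
def Claim_equal_filter_max_bp_span : Prop := ∀ (structure_ : String) (max_bp_span : Option Int), Dom_filter_max_bp_span structure_ max_bp_span → Pre_filter_max_bp_span structure_ max_bp_span → Spec_filter_max_bp_span structure_ max_bp_span (filter_max_bp_span structure_ max_bp_span)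

-- ===== LEMMAS AND PROOFS =====

-- the list of (open, close) pairs a balanced scan produces, in closing order; none = unbalanced
def pvClosures : List (Int × Char) → List Int → Option (List (Int × Int))
  | [], stack => if stack = [] then some [] else none
  | (i, ch) :: rest, stack =>
    if ch = '(' then pvClosures rest (i :: stack)
    else if ch = ')' then
      match stack with
      | [] => none
      | j :: stack' => (pvClosures rest stack').map (fun l => (j, i) :: l)
    else pvClosures rest stack

-- the common per-pair update step both ports fold with
def pvStep (m : Int) (acc : List Char × Int) (p : Int × Int) : List Char × Int :=
  if p.2 - p.1 > m then
    ((PySem.List.pySetD (PySem.List.pySetD acc.1 p.1 '.') p.2 '.'), acc.2 + 1)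
  else acc

def pvIns (d : PySem.Dict Int Int) (p : Int × Int) : PySem.Dict Int Int :=
  (d.insert p.2 p.1).insert p.1 p.2

def pvIdxs (P : List (Int × Int)) : List Int := P.flatMap (fun p => [p.1, p.2])

lemma pvPairTableGo_eq (xs : List (Int × Char)) (st : List Int) (d : PySem.Dict Int Int) :
    pvPairTableGo xs st d = (pvClosures xs st).map (fun P => P.foldl pvIns d) := by
  induction xs generalizing st d with
  | nil =>
    simp only [pvPairTableGo, pvClosures]
    split <;> simp
  | cons p rest ih =>
    obtain ⟨i, ch⟩ := p
    simp only [pvPairTableGo, pvClosures]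
    split_ifs with h1 h2
    · exact ih _ _
    · cases st with
      | nil => rfl
      | cons j st' =>
        dsimp only
        rw [ih]
        cases pvClosures rest st' <;> simp [pvIns]
    · exact ih _ _

lemma pvScanB_eq (m : Int) (xs : List (Int × Char)) (st : List Int) (chars : List Char) (rem : Int) :
    pvScanB m xs st chars rem = (pvClosures xs st).map (fun P => P.foldl (pvStep m) (chars, rem)) := by
  induction xs generalizing st chars rem with
  | nil =>
    simp only [pvScanB, pvClosures]
    split <;> simp
  | cons p rest ih =>
    obtain ⟨i, ch⟩ := p
    simp only [pvScanB, pvClosures]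
    split_ifs with h1 h2
    · exact ih _ _ _
    · cases st with
      | nil => rfl
      | cons j st' =>
        dsimp only
        split_ifs with h3 <;>
          · rw [ih]
            cases pvClosures rest st' <;> simp [pvStep, h3]
    · exact ih _ _ _

lemma mem_pvIdxs {x : Int} {P : List (Int × Int)} :
    x ∈ pvIdxs P ↔ ∃ p ∈ P, x = p.1 ∨ x = p.2 := by
  simp [pvIdxs, List.mem_flatMap]

lemma pvClosures_inv (xs : List Char) (n : Int) (st : List Int) (P : List (Int × Int))
    (hst : ∀ x ∈ st, x < n) (hnd : st.Nodup)
    (h : pvClosures (PySem.List.enumerate xs n) st = some P) :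
    (∀ p ∈ P, (p.1 ∈ st ∨ n ≤ p.1) ∧ p.1 < p.2 ∧ n ≤ p.2) ∧ (pvIdxs P).Nodup := by
  induction xs generalizing n st P with
  | nil =>
    simp only [PySem.List.enumerate_nil, pvClosures] at h
    split at h
    · cases h
      exact ⟨by simp, by simp [pvIdxs]⟩
    · cases h
  | cons c cs ih =>
    rw [PySem.List.enumerate_cons] at h
    simp only [pvClosures] at h
    split_ifs at h with h1 h2
    · -- '('
      have hst' : ∀ x ∈ n :: st, x < n + 1 := by
        intro x hx
        rcases List.mem_cons.mp hx with hx | hx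
        · omega
        · have := hst x hx; omega
      have hnd' : (n :: st).Nodup := by
        refine List.nodup_cons.mpr ⟨fun hmem => ?_, hnd⟩
        exact absurd (hst n hmem) (lt_irrefl n)
      obtain ⟨ha, hb⟩ := ih (n + 1) (n :: st) P hst' hnd' h
      refine ⟨?_, hb⟩
      intro p hp
      obtain ⟨hm, hlt, hle⟩ := ha p hp
      refine ⟨?_, hlt, by omega⟩
      rcases hm with hm | hm
      · rcases List.mem_cons.mp hm with hm | hm
        · right; omega
        · left; exact hm
      · right; omega
    · -- ')'
      cases st with
      | nil => cases h
      | cons j st' =>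
        simp only at h
        obtain ⟨P', hP', rfl⟩ := Option.map_eq_some_iff.mp h
        have hst' : ∀ x ∈ st', x < n + 1 := by
          intro x hx
          have := hst x (List.mem_cons_of_mem _ hx); omega
        have hnd' : st'.Nodup := (List.nodup_cons.mp hnd).2
        have hjst' : j ∉ st' := (List.nodup_cons.mp hnd).1
        have hjn : j < n := hst j (List.mem_cons_self)
        obtain ⟨ha, hb⟩ := ih (n + 1) st' P' hst' hnd' hP'
        constructor
        · intro p hp
          rcases List.mem_cons.mp hp with rfl | hp
          · exact ⟨Or.inl List.mem_cons_self, by omega, by omega⟩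
          · obtain ⟨hm, hlt, hle⟩ := ha p hp
            refine ⟨?_, hlt, by omega⟩
            rcases hm with hm | hm
            · left; exact List.mem_cons_of_mem _ hm
            · right; omega
        · show (j :: n :: pvIdxs P').Nodup
          have hjni : j ∉ pvIdxs P' := by
            intro hmem
            obtain ⟨p, hp, hor⟩ := mem_pvIdxs.mp hmem
            obtain ⟨hm, hlt, hle⟩ := ha p hp
            rcases hor with rfl | rfl
            · rcases hm with hm | hm
              · exact hjst' hm
              · omega
            · omega
          have hnni : n ∉ pvIdxs P' := by
            intro hmem
            obtain ⟨p, hp, hor⟩ := mem_pvIdxs.mp hmem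
            obtain ⟨hm, hlt, hle⟩ := ha p hp
            rcases hor with rfl | rfl
            · rcases hm with hm | hm
              · have := hst' p.1 hm
                have := hst p.1 (List.mem_cons_of_mem _ hm)
                omega
              · omega
            · omega
          refine List.nodup_cons.mpr ⟨?_, List.nodup_cons.mpr ⟨hnni, hb⟩⟩
          simp only [List.mem_cons]
          push Not
          exact ⟨by omega, hjni⟩
    · -- other char
      have hst' : ∀ x ∈ st, x < n + 1 := fun x hx => by have := hst x hx; omega
      obtain ⟨ha, hb⟩ := ih (n + 1) st P hst' hnd h
      refine ⟨?_, hb⟩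
      intro p hp
      obtain ⟨hm, hlt, hle⟩ := ha p hp
      refine ⟨?_, hlt, by omega⟩
      rcases hm with hm | hm
      · left; exact hm
      · right; omega

lemma pvNodup_of_idxs (P : List (Int × Int)) (h : (pvIdxs P).Nodup) : P.Nodup := by
  induction P with
  | nil => exact List.nodup_nil
  | cons p rest ih =>
    have h' : (p.1 :: p.2 :: pvIdxs rest).Nodup := h
    obtain ⟨h1, h2⟩ := List.nodup_cons.mp h'
    obtain ⟨h3, h4⟩ := List.nodup_cons.mp h2
    refine List.nodup_cons.mpr ⟨fun hmem => ?_, ih h4⟩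
    exact h1 (List.mem_cons_of_mem _ (mem_pvIdxs.mpr ⟨p, hmem, Or.inl rfl⟩))

lemma pvItems_foldl (P : List (Int × Int)) (d : PySem.Dict Int Int)
    (hfresh : ∀ x ∈ pvIdxs P, d.contains x = false)
    (hnd : (pvIdxs P).Nodup) :
    (P.foldl pvIns d).items = d.items ++ P.flatMap (fun p => [(p.2, p.1), (p.1, p.2)]) := by
  induction P generalizing d with
  | nil => simp
  | cons p rest ih =>
    have hidx : pvIdxs (p :: rest) = p.1 :: p.2 :: pvIdxs rest := rfl
    rw [hidx] at hnd hfresh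
    obtain ⟨hn1, hnd2⟩ := List.nodup_cons.mp hnd
    obtain ⟨hn2, hnd3⟩ := List.nodup_cons.mp hnd2
    have h12 : p.1 ≠ p.2 := by simp only [List.mem_cons] at hn1; push Not at hn1; exact hn1.1
    have hf1 : d.contains p.1 = false := hfresh p.1 (by simp)
    have hf2 : d.contains p.2 = false := hfresh p.2 (by simp)
    have hitems : (pvIns d p).items = d.items ++ [(p.2, p.1), (p.1, p.2)] := by
      have c1 : (d.insert p.2 p.1).contains p.1 = false := by
        rw [PySem.Dict.contains_insert, hf1]
        simp [h12]
      unfold pvIns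
      rw [PySem.Dict.items_insert_of_not_contains _ _ c1,
          PySem.Dict.items_insert_of_not_contains _ _ hf2]
      simp
    have hfresh' : ∀ x ∈ pvIdxs rest, (pvIns d p).contains x = false := by
      intro x hx
      have hx1 : x ≠ p.1 := by rintro rfl; simp only [List.mem_cons] at hn1; push Not at hn1; exact hn1.2 hx
      have hx2 : x ≠ p.2 := by rintro rfl; exact hn2 hx
      unfold pvIns
      rw [PySem.Dict.contains_insert, PySem.Dict.contains_insert]
      simp [hx1, hx2, hfresh x (by simp [hx])]
    rw [List.foldl_cons, ih (pvIns d p) hfresh' hnd3, hitems]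
    simp

lemma pvNorm_flatMap (P : List (Int × Int)) (hlt : ∀ p ∈ P, p.1 < p.2) :
    (P.flatMap (fun p => [(p.2, p.1), (p.1, p.2)])).map (fun q => (min q.1 q.2, max q.1 q.2))
      = P.flatMap (fun p => [p, p]) := by
  induction P with
  | nil => simp
  | cons p rest ih =>
    have hp := hlt p (by simp)
    simp only [List.flatMap_cons, List.map_append]
    rw [ih (fun q hq => hlt q (by simp [hq]))]
    congr 1
    simp only [List.map_cons, List.map_nil]
    have h1 : min p.2 p.1 = p.1 := by omega
    have h2 : max p.2 p.1 = p.2 := by omega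
    have h3 : min p.1 p.2 = p.1 := by omega
    have h4 : max p.1 p.2 = p.2 := by omega
    rw [h1, h2, h3, h4]

lemma pvStep_comm (m : Int) (x y : Int × Int)
    (hx1 : 0 ≤ x.1) (hx2 : 0 ≤ x.2) (hy1 : 0 ≤ y.1) (hy2 : 0 ≤ y.2) (z : List Char × Int) :
    pvStep m (pvStep m z x) y = pvStep m (pvStep m z y) x := by
  unfold pvStep
  split_ifs with hcx hcy hcy <;> try rfl
  simp only [Prod.mk.injEq]
  simp only [PySem.List.pySetD_of_nonneg, hx1, hx2, hy1, hy2]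
  refine ⟨?_, trivial⟩
  apply List.ext_getElem?
  intro k
  simp only [List.getElem?_set, List.length_set]
  split_ifs <;> first | rfl | omega

-- ===== VERDICT (by name: the statement is the Claim_ definition above) =====
theorem filter_max_bp_span_spec : Claim_equal_filter_max_bp_span := by
  intro s max _ _
  unfold Spec_filter_max_bp_span
  cases max with
  | none => rfl
  | some m =>
    show filter_max_bp_span s (some m) = filter_max_bp_span_alt s (some m)
    unfold filter_max_bp_span filter_max_bp_span_alt pvExtractPairs pvPairTable
    dsimp only
    rw [pvPairTableGo_eq, pvScanB_eq]
    cases hc : pvClosures (PySem.List.enumerate s.toList) [] with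
    | none => rfl
    | some P =>
      simp only [Option.map_some]
      obtain ⟨hmem, hnd⟩ := pvClosures_inv s.toList 0 [] P (by simp) List.nodup_nil hc
      have hfresh : ∀ x ∈ pvIdxs P, (PySem.Dict.empty : PySem.Dict Int Int).contains x = false :=
        fun x _ => PySem.Dict.contains_empty x
      have hitems := pvItems_foldl P PySem.Dict.empty hfresh hnd
      have hlt : ∀ p ∈ P, p.1 < p.2 := fun p hp => (hmem p hp).2.1
      have h0 : ∀ p ∈ P, 0 ≤ p.1 ∧ 0 ≤ p.2 := by
        intro p hp
        obtain ⟨hm, hlt', hle⟩ := hmem p hp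
        rcases hm with hm | hm
        · simp at hm
        · exact ⟨hm, by omega⟩
      have hPnd : P.Nodup := pvNodup_of_idxs P hnd
      have hempty : (PySem.Dict.empty : PySem.Dict Int Int).items = [] := rfl
      rw [hitems, hempty, List.nil_append, pvNorm_flatMap P hlt]
      have hperm1 : (PySem.Set.ofList (P.flatMap (fun p => [p, p]))).Perm P := by
        refine (List.perm_ext_iff_of_nodup (PySem.Set.nodup_ofList _) hPnd).mpr ?_
        intro a
        rw [PySem.Set.mem_ofList]
        simp [List.mem_flatMap]
      have hperm : (PySem.List.sorted (PySem.Set.ofList (P.flatMap (fun p => [p, p])))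
          (fun p => p.1) false).Perm P :=
        (PySem.List.sorted_perm _ _ _).trans hperm1
      have hlam : (fun (acc : List Char × Int) (p : Int × Int) =>
          if p.2 - p.1 > m then
            ((PySem.List.pySetD (PySem.List.pySetD acc.1 p.1 '.') p.2 '.'), acc.2 + 1)
          else acc) = pvStep m := rfl
      simp only [hlam]
      rw [hperm.foldl_eq' (by
        intro x hx y hy z
        exact pvStep_comm m x y (h0 x (hperm.subset hx)).1 (h0 x (hperm.subset hx)).2
          (h0 y (hperm.subset hy)).1 (h0 y (hperm.subset hy)).2 z) _]
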